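-- pv_equiv track=rewrite | github.com/pulcherriman/Programming_Contest | AtCoder/AHC/031-040/AHC036/test copy.py | find_path_between_two_nodes_bfs_no_direct_edge_no_logging
-- ===== SOURCE A (Python) =====
-- from collections import deque
--
-- def find_path_between_two_nodes_bfs_no_direct_edge_no_logging(graph, u, v, visited):
--     queue = deque([[u]])
--     visited = set(visited)
--     visited.discard(v)
--
--     while queue:
--         path = queue.popleft()
--         node = path[-1]
--         if len(path) > 5:
--             break
--
--         if node == v and len(path) > 2:
--             return path
--
--         for neighbor in graph[node]:
--             if neighbor not in visited and neighbor not in path: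
--                 new_path = list(path)
--                 new_path.append(neighbor)
--                 queue.append(new_path)
--
--     return [u, v]
-- ===== SOURCE B (Python) =====
-- def find_path_between_two_nodes_bfs_no_direct_edge_no_logging(graph, u, v, visited):
--     blocked = set(visited)
--     blocked.discard(v)
--
--     def dfs(path, limit):
--         node = path[-1]
--         if len(path) == limit:
--             return path if node == v else None
--         for neighbor in graph[node]:
--             if neighbor not in blocked and neighbor not in path:
--                 found = dfs(path + [neighbor], limit)
--                 if found is not None:
--                     return found
--         return None
--
--     for limit in (3, 4, 5):
--         found = dfs([u], limit)
--         if found is not None: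
--             return found
--     return [u, v]
-- ===== Notes on version B (the rewrite author's own statement) =====
-- stated objective: alternative
-- what changed: A's breadth-first search over an explicit FIFO queue of whole paths is replaced by iterative-deepening depth-limited DFS (limits 3, 4, 5, neighbors in list order), which yields the same shortest-first, lexicographically-first path without maintaining a queue; on every input where A returns, B returns the identical value (B only looks up nodes A itself looked up).
-- outside the precondition, e.g. on find_path_between_two_nodes_bfs_no_direct_edge_no_logging({0: [1], 1: [0, 2]}, 0, 2, []): A returns [0, 1, 2], B returns [0, 1, 2]
import Mathlib
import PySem

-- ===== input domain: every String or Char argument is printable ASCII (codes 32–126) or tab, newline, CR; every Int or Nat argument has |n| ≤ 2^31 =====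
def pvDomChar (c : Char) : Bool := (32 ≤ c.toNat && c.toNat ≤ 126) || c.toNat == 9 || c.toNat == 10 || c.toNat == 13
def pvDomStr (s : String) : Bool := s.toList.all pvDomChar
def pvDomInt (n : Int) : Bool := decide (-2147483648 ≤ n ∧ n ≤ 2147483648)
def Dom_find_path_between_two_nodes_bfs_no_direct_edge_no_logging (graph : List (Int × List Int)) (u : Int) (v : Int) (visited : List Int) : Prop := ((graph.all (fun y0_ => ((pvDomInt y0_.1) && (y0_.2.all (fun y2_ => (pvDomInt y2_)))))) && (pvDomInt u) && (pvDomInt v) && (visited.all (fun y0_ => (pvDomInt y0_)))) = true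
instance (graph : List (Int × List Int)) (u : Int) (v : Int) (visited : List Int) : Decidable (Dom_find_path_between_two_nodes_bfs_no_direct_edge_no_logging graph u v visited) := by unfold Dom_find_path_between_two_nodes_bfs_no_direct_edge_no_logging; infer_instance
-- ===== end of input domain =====

-- B replaces A's BFS over an explicit queue of paths by iterative-deepening depth-limited DFS
-- (depths 3,4,5, neighbors in list order, missing nodes given no neighbors); same returned path.


-- `graph[node]` of the Python dict, totalised with [] (inputs where either side's KeyError is reachable
-- are excluded by Pre_)
def pvNbrs (graph : List (Int × List Int)) (node : Int) : List Int :=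
  (PySem.Dict.get? (PySem.Dict.mk graph) node).getD []

-- ===== PORT A =====
-- fuel for the while loop (a totality guard only: the loop pops at most 2+E+E^2+E^3+E^4 paths, E = total edge count)
def pvFuelA (graph : List (Int × List Int)) : Nat :=
  let E := (graph.map (fun kv => kv.2.length)).sum
  2 + E + E ^ 2 + E ^ 3 + E ^ 4

-- the while loop: queue of paths, popleft at the head, append at the tail
def pvBfsLoop (graph : List (Int × List Int)) (u : Int) (v : Int) (vis : List Int) :
    Nat → List (List Int) → List Int
  | _, [] => [u, v]
  | 0, _ :: _ => [u, v]
  | fuel + 1, path :: queue =>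
    let node := (PySem.List.pyGet? path (-1)).getD 0
    if 5 < path.length then [u, v]
    else if node = v ∧ 2 < path.length then path
    else
      pvBfsLoop graph u v vis fuel
        ((pvNbrs graph node).foldl
          (fun q neighbor =>
            if !(vis.contains neighbor) && !(path.contains neighbor)
            then q ++ [path ++ [neighbor]] else q)
          queue)

def find_path_between_two_nodes_bfs_no_direct_edge_no_logging (graph : List (Int × List Int)) (u : Int) (v : Int) (visited : List Int) : List Int :=
  let vis := PySem.Set.discard (PySem.Set.ofList visited) v
  pvBfsLoop graph u v vis (pvFuelA graph) [[u]]

-- ===== PORT B =====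
-- depth-limited DFS; `rem` is limit - len(path) (the recursion adds one node per call)
def pvDfs (graph : List (Int × List Int)) (v : Int) (vis : List Int) :
    Nat → List Int → Option (List Int)
  | 0, path =>
    let node := (PySem.List.pyGet? path (-1)).getD 0
    if node = v then some path else none
  | rem + 1, path =>
    let node := (PySem.List.pyGet? path (-1)).getD 0
    (pvNbrs graph node).findSome? (fun neighbor =>
      if !(vis.contains neighbor) && !(path.contains neighbor)
      then pvDfs graph v vis rem (path ++ [neighbor]) else none)

def find_path_between_two_nodes_bfs_no_direct_edge_no_logging_alt (graph : List (Int × List Int)) (u : Int) (v : Int) (visited : List Int) : List Int :=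
  let vis := PySem.Set.discard (PySem.Set.ofList visited) v
  match pvDfs graph v vis 2 [u] with
  | some p => p
  | none =>
    match pvDfs graph v vis 3 [u] with
    | some p => p
    | none =>
      match pvDfs graph v vis 4 [u] with
      | some p => p
      | none => [u, v]

-- ===== PRECONDITION & SPEC =====
-- Pre_ excludes the inputs where Python A can raise KeyError (graph[x] for a missing key): it requires every
-- node within 4 unblocked-neighbor steps of u to be a key of graph.  This closure condition is conservative
-- (A may return before popping a missing node, via an early hit of v); on such excluded inputs where A still
-- returns, B performs only lookups A performed and returns the IDENTICAL value — see the cite.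
def Pre_find_path_between_two_nodes_bfs_no_direct_edge_no_logging (graph : List (Int × List Int)) (u : Int) (v : Int) (visited : List Int) : Prop :=
  (let vis := PySem.Set.discard (PySem.Set.ofList visited) v
   let step := fun (S : List Int) =>
     PySem.Set.update S
       ((S.flatMap (fun k => (PySem.Dict.get? (PySem.Dict.mk graph) k).getD [])).filter
         (fun n => !(vis.contains n)))
   (step (step (step (step [u])))).all
     (fun k => (PySem.Dict.get? (PySem.Dict.mk graph) k).isSome)) = true
instance (graph : List (Int × List Int)) (u : Int) (v : Int) (visited : List Int) : Decidable (Pre_find_path_between_two_nodes_bfs_no_direct_edge_no_logging graph u v visited) := by unfold Pre_find_path_between_two_nodes_bfs_no_direct_edge_no_logging; infer_instance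

def pvWitness_find_path_between_two_nodes_bfs_no_direct_edge_no_logging : (List (Int × List Int)) × Int × Int × List Int :=
  ([(0, [1]), (1, [0, 2]), (2, [1])], 0, 2, [])

def Spec_find_path_between_two_nodes_bfs_no_direct_edge_no_logging (graph : List (Int × List Int)) (u : Int) (v : Int) (visited : List Int) (out : List Int) : Prop := out = find_path_between_two_nodes_bfs_no_direct_edge_no_logging_alt graph u v visited
instance (graph : List (Int × List Int)) (u : Int) (v : Int) (visited : List Int) (out : List Int) : Decidable (Spec_find_path_between_two_nodes_bfs_no_direct_edge_no_logging graph u v visited out) := by unfold Spec_find_path_between_two_nodes_bfs_no_direct_edge_no_logging; infer_instance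

-- ===== CLAIM (what is proved, stated in full; the proofs are below) =====
def Claim_equal_find_path_between_two_nodes_bfs_no_direct_edge_no_logging : Prop := ∀ (graph : List (Int × List Int)) (u : Int) (v : Int) (visited : List Int), Dom_find_path_between_two_nodes_bfs_no_direct_edge_no_logging graph u v visited → Pre_find_path_between_two_nodes_bfs_no_direct_edge_no_logging graph u v visited → Spec_find_path_between_two_nodes_bfs_no_direct_edge_no_logging graph u v visited (find_path_between_two_nodes_bfs_no_direct_edge_no_logging graph u v visited)

-- ===== LEMMAS AND PROOFS =====

-- the children of a path (both programs extend a path the same way)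
def pvCh (graph : List (Int × List Int)) (vis : List Int) (p : List Int) : List (List Int) :=
  (((pvNbrs graph ((PySem.List.pyGet? p (-1)).getD 0))).filter
      (fun n => !(vis.contains n) && !(p.contains n))).map (fun n => p ++ [n])

-- all descendants of p exactly r levels below it, in left-to-right (lexicographic) order
def pvDesc (graph : List (Int × List Int)) (vis : List Int) : Nat → List Int → List (List Int)
  | 0, p => [p]
  | r + 1, p => (pvCh graph vis p).flatMap (pvDesc graph vis r)

-- the "path ends at v" test
def pvHit (v : Int) (q : List Int) : Bool := decide ((PySem.List.pyGet? q (-1)).getD 0 = v)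

theorem pv_find?_congr {α : Type} (p q : α → Bool) (l : List α)
    (h : ∀ x ∈ l, p x = q x) : l.find? p = l.find? q := by
  induction l with
  | nil => rfl
  | cons a l ih =>
    simp only [List.find?_cons, h a (by simp)]
    cases q a <;> simp [ih (fun x hx => h x (by simp [hx]))]

theorem pv_findSome?_guard {α β : Type} (c : α → Bool) (g : α → Option β) (l : List α) :
    l.findSome? (fun x => if c x then g x else none) = (l.filter c).findSome? g := by
  induction l with
  | nil => rfl
  | cons a l ih =>
    by_cases h : c a <;> simp [List.findSome?_cons, h, ih]

-- B's DFS finds the first length-(len p + r) descendant of p ending at v, in lexicographic order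
theorem pvDfs_eq_find (graph : List (Int × List Int)) (v : Int) (vis : List Int)
    (r : Nat) (p : List Int) :
    pvDfs graph v vis r p = (pvDesc graph vis r p).find? (pvHit v) := by
  induction r generalizing p with
  | zero =>
    by_cases h : (PySem.List.pyGet? p (-1)).getD 0 = v <;>
      simp [pvDfs, pvDesc, pvHit, h]
  | succ r ih =>
    simp only [pvDfs, pvDesc, ih, List.find?_flatMap, pvCh,
      List.findSome?_map, pv_findSome?_guard, Function.comp_def]

-- pvDesc unfolds at the far end too
theorem pvDesc_succ_right (graph : List (Int × List Int)) (vis : List Int) (r : Nat) (p : List Int) :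
    pvDesc graph vis (r + 1) p = (pvDesc graph vis r p).flatMap (pvCh graph vis) := by
  induction r generalizing p with
  | zero =>
    show (pvCh graph vis p).flatMap (pvDesc graph vis 0) = [p].flatMap (pvCh graph vis)
    have h0 : pvDesc graph vis 0 = fun q => [q] := rfl
    rw [h0, List.flatMap_singleton', List.flatMap_cons, List.flatMap_nil, List.append_nil]
  | succ r ih =>
    calc pvDesc graph vis (r + 2) p
        = (pvCh graph vis p).flatMap (pvDesc graph vis (r + 1)) := rfl
      _ = (pvCh graph vis p).flatMap (fun c => (pvDesc graph vis r c).flatMap (pvCh graph vis)) := by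
            exact congrArg (fun f => List.flatMap f (pvCh graph vis p)) (funext ih)
      _ = ((pvCh graph vis p).flatMap (pvDesc graph vis r)).flatMap (pvCh graph vis) := by
            rw [List.flatMap_assoc]
      _ = (pvDesc graph vis (r + 1) p).flatMap (pvCh graph vis) := rfl

-- every descendant r levels down is longer by exactly r
theorem pvDesc_length_mem (graph : List (Int × List Int)) (vis : List Int) (r : Nat)
    (p q : List Int) (hq : q ∈ pvDesc graph vis r p) : q.length = p.length + r := by
  induction r generalizing p with
  | zero => simp_all [pvDesc]
  | succ r ih =>
    simp only [pvDesc, List.mem_flatMap] at hq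
    obtain ⟨c, hc, hqc⟩ := hq
    simp only [pvCh, List.mem_map] at hc
    obtain ⟨n, -, rfl⟩ := hc
    have := ih (p ++ [n]) hqc
    simp at this
    omega

-- size bounds, to pay for the fuel
theorem pvNbrs_length_le (graph : List (Int × List Int)) (k : Int) :
    (pvNbrs graph k).length ≤ (graph.map (fun kv => kv.2.length)).sum := by
  unfold pvNbrs PySem.Dict.get?
  cases h : List.find? (fun p => p.1 == k) (PySem.Dict.mk graph).items with
  | none => simp
  | some kv =>
    have hmem : kv ∈ graph := List.mem_of_find?_eq_some h
    have : kv.2.length ∈ graph.map (fun kv => kv.2.length) := List.mem_map_of_mem hmem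
    simpa [h] using List.single_le_sum (by simp) _ this

theorem pvDesc_length_le (graph : List (Int × List Int)) (vis : List Int) (r : Nat) (p : List Int) :
    (pvDesc graph vis r p).length ≤ ((graph.map (fun kv => kv.2.length)).sum) ^ r := by
  induction r generalizing p with
  | zero => simp [pvDesc]
  | succ r ih =>
    have hch : (pvCh graph vis p).length ≤ (graph.map (fun kv => kv.2.length)).sum :=
      le_trans (by simpa [pvCh] using List.length_filter_le _ _) (pvNbrs_length_le graph _)
    calc (pvDesc graph vis (r + 1) p).length
        = ((pvCh graph vis p).map (fun c => (pvDesc graph vis r c).length)).sum := by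
          simp [pvDesc, List.length_flatMap]
      _ ≤ (pvCh graph vis p).length * ((graph.map (fun kv => kv.2.length)).sum) ^ r := by
          simpa [smul_eq_mul] using
            List.sum_le_card_nsmul ((pvCh graph vis p).map (fun c => (pvDesc graph vis r c).length))
              (((graph.map (fun kv => kv.2.length)).sum) ^ r) (by
                intro x hx
                simp only [List.mem_map] at hx
                obtain ⟨c, -, rfl⟩ := hx
                exact ih c)
      _ ≤ ((graph.map (fun kv => kv.2.length)).sum) ^ (r + 1) := by
          rw [pow_succ, Nat.mul_comm]
          exact Nat.mul_le_mul_left _ hch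

-- A's BFS consumes one whole level: first hit of the level if any, else recurse on the next queue
theorem pvBfsLoop_level (graph : List (Int × List Int)) (u : Int) (v : Int) (vis : List Int)
    (k : Nat) (hk : k ≤ 5) :
    ∀ (A B : List (List Int)) (fuel : Nat), (∀ p ∈ A, p.length = k) → A.length ≤ fuel →
      pvBfsLoop graph u v vis fuel (A ++ B) =
        match A.find? (fun q => decide ((PySem.List.pyGet? q (-1)).getD 0 = v ∧ 2 < q.length)) with
        | some p => p
        | none => pvBfsLoop graph u v vis (fuel - A.length) (B ++ A.flatMap (pvCh graph vis)) := by
  intro A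
  induction A with
  | nil =>
    intro B fuel _ _
    simp
  | cons p A ih =>
    intro B fuel hlen hfuel
    cases fuel with
    | zero => simp at hfuel
    | succ f =>
      have hp : p.length = k := hlen p (by simp)
      have h5 : ¬ 5 < p.length := by omega
      show pvBfsLoop graph u v vis (f + 1) (p :: (A ++ B)) = _
      by_cases hhit : (PySem.List.pyGet? p (-1)).getD 0 = v ∧ 2 < p.length
      · simp only [pvBfsLoop, if_neg h5, if_pos hhit]
        simp [hhit]
      · simp only [pvBfsLoop, if_neg h5, if_neg hhit]
        rw [PySem.List.foldl_append_if
          (fun n => !vis.contains n && !p.contains n) (fun n => p ++ [n]) _ (A ++ B)]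
        have hq : (A ++ B) ++
            ((pvNbrs graph ((PySem.List.pyGet? p (-1)).getD 0)).filter
              (fun n => !vis.contains n && !p.contains n)).map (fun n => p ++ [n]) =
            A ++ (B ++ pvCh graph vis p) := by
          simp [pvCh, List.append_assoc]
        rw [hq, ih (B ++ pvCh graph vis p) f (fun q hq => hlen q (by simp [hq])) (by simpa using hfuel)]
        have hpredp : (decide ((PySem.List.pyGet? p (-1)).getD 0 = v ∧ 2 < p.length)) = false := by
          simpa using hhit
        simp only [List.find?_cons, hpredp]
        cases List.find? (fun q => decide ((PySem.List.pyGet? q (-1)).getD 0 = v ∧ 2 < q.length)) A with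
        | some q => rfl
        | none =>
          have harith : f - A.length = f + 1 - (p :: A).length := by simp
          have hlist : (B ++ pvCh graph vis p) ++ A.flatMap (pvCh graph vis) =
              B ++ (p :: A).flatMap (pvCh graph vis) := by
            simp [List.flatMap_cons, List.append_assoc]
          rw [harith, hlist]

-- once every queued path has length 6, the next pop breaks (or the queue is empty): result [u, v]
theorem pvBfsLoop_break (graph : List (Int × List Int)) (u : Int) (v : Int) (vis : List Int)
    (Q : List (List Int)) (fuel : Nat) (hQ : ∀ p ∈ Q, p.length = 6) :
    pvBfsLoop graph u v vis fuel Q = [u, v] := by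
  cases Q with
  | nil => cases fuel <;> rfl
  | cons p Q =>
    cases fuel with
    | zero => rfl
    | succ f =>
      have : p.length = 6 := hQ p (by simp)
      simp [pvBfsLoop, this]

theorem pv_main (graph : List (Int × List Int)) (u : Int) (v : Int) (visited : List Int) :
    find_path_between_two_nodes_bfs_no_direct_edge_no_logging graph u v visited =
      find_path_between_two_nodes_bfs_no_direct_edge_no_logging_alt graph u v visited := by
  unfold find_path_between_two_nodes_bfs_no_direct_edge_no_logging
    find_path_between_two_nodes_bfs_no_direct_edge_no_logging_alt
  set vis := PySem.Set.discard (PySem.Set.ofList visited) v with hvis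
  set E := (graph.map (fun kv => kv.2.length)).sum with hE
  have hfuel : pvFuelA graph = 2 + E + E ^ 2 + E ^ 3 + E ^ 4 := rfl
  have hlen : ∀ (r : Nat) (q : List Int), q ∈ pvDesc graph vis r [u] → q.length = r + 1 := by
    intro r q h
    have := pvDesc_length_mem graph vis r [u] q h
    simpa [Nat.add_comm] using this
  have hsz : ∀ r : Nat, (pvDesc graph vis r [u]).length ≤ E ^ r :=
    fun r => pvDesc_length_le graph vis r [u]
  -- at levels 1 and 2 (lengths 1 and 2) nothing is returned
  have hno : ∀ r : Nat, r ≤ 1 →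
      (pvDesc graph vis r [u]).find?
        (fun q => decide ((PySem.List.pyGet? q (-1)).getD 0 = v ∧ 2 < q.length)) = none := by
    intro r hr
    apply List.find?_eq_none.mpr
    intro q hq
    have hl := hlen r q hq
    simp only [decide_eq_true_eq, not_and]
    intro _
    omega
  -- at levels 3..5 the BFS hit test is exactly "ends at v"
  have hhit : ∀ r : Nat, 2 ≤ r →
      (pvDesc graph vis r [u]).find?
        (fun q => decide ((PySem.List.pyGet? q (-1)).getD 0 = v ∧ 2 < q.length)) =
      pvDfs graph v vis r [u] := by
    intro r hr
    rw [pvDfs_eq_find]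
    apply pv_find?_congr
    intro q hq
    have hl := hlen r q hq
    have h2 : 2 < q.length := by omega
    simp [pvHit, h2]
  -- one BFS level with no hit advances to the next level
  have step : ∀ (r : Nat) (fuel' : Nat), r ≤ 4 → (pvDesc graph vis r [u]).length ≤ fuel' →
      (pvDesc graph vis r [u]).find?
        (fun q => decide ((PySem.List.pyGet? q (-1)).getD 0 = v ∧ 2 < q.length)) = none →
      pvBfsLoop graph u v vis fuel' (pvDesc graph vis r [u]) =
        pvBfsLoop graph u v vis (fuel' - (pvDesc graph vis r [u]).length)
          (pvDesc graph vis (r + 1) [u]) := by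
    intro r fuel' hr hf hnone
    have h := pvBfsLoop_level graph u v vis (r + 1) (by omega) (pvDesc graph vis r [u]) [] fuel'
      (fun q hq => hlen r q hq) hf
    simp only [List.append_nil, List.nil_append] at h
    rw [h, hnone, pvDesc_succ_right]
  -- a BFS level with a hit returns the first hit
  have stepHit : ∀ (r : Nat) (fuel' : Nat) (p : List Int), r ≤ 4 →
      (pvDesc graph vis r [u]).length ≤ fuel' →
      (pvDesc graph vis r [u]).find?
        (fun q => decide ((PySem.List.pyGet? q (-1)).getD 0 = v ∧ 2 < q.length)) = some p →
      pvBfsLoop graph u v vis fuel' (pvDesc graph vis r [u]) = p := by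
    intro r fuel' p hr hf hsome
    have h := pvBfsLoop_level graph u v vis (r + 1) (by omega) (pvDesc graph vis r [u]) [] fuel'
      (fun q hq => hlen r q hq) hf
    simp only [List.append_nil, List.nil_append] at h
    rw [h, hsome]
  have hd0 : pvDesc graph vis 0 [u] = [[u]] := rfl
  -- abbreviate the level sizes
  have h1 := hsz 1; have h2 := hsz 2; have h3 := hsz 3; have h4 := hsz 4
  rw [pow_one] at h1
  have e0 : pvBfsLoop graph u v vis (pvFuelA graph) [[u]] =
      pvBfsLoop graph u v vis (pvFuelA graph - 1) (pvDesc graph vis 1 [u]) := by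
    have := step 0 (pvFuelA graph) (by omega) (by rw [hd0, hfuel]; simp; omega) (hno 0 (by omega))
    rw [hd0] at this
    simpa [hd0] using this
  have e1 : pvBfsLoop graph u v vis (pvFuelA graph - 1) (pvDesc graph vis 1 [u]) =
      pvBfsLoop graph u v vis (pvFuelA graph - 1 - (pvDesc graph vis 1 [u]).length)
        (pvDesc graph vis 2 [u]) :=
    step 1 _ (by omega) (by rw [hfuel]; omega) (hno 1 (by omega))
  rw [e0, e1]
  cases hdfs2 : pvDfs graph v vis 2 [u] with
  | some p =>
    rw [stepHit 2 _ p (by omega) (by rw [hfuel]; omega) ((hhit 2 (by omega)).trans hdfs2)]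
    simp [hdfs2]
  | none =>
    have e2 := step 2 (pvFuelA graph - 1 - (pvDesc graph vis 1 [u]).length) (by omega)
      (by rw [hfuel]; omega) ((hhit 2 (by omega)).trans hdfs2)
    rw [e2]
    cases hdfs3 : pvDfs graph v vis 3 [u] with
    | some p =>
      rw [stepHit 3 (pvFuelA graph - 1 - (pvDesc graph vis 1 [u]).length - (pvDesc graph vis 2 [u]).length) p (by omega) (by rw [hfuel]; omega) ((hhit 3 (by omega)).trans hdfs3)]
      simp [hdfs2, hdfs3]
    | none =>
      have e3 := step 3 (pvFuelA graph - 1 - (pvDesc graph vis 1 [u]).length - (pvDesc graph vis 2 [u]).length) (by omega) (by rw [hfuel]; omega) ((hhit 3 (by omega)).trans hdfs3)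
      rw [e3]
      cases hdfs4 : pvDfs graph v vis 4 [u] with
      | some p =>
        rw [stepHit 4 (pvFuelA graph - 1 - (pvDesc graph vis 1 [u]).length - (pvDesc graph vis 2 [u]).length - (pvDesc graph vis 3 [u]).length) p (by omega) (by rw [hfuel]; omega) ((hhit 4 (by omega)).trans hdfs4)]
        simp [hdfs2, hdfs3, hdfs4]
      | none =>
        have e4 := step 4 (pvFuelA graph - 1 - (pvDesc graph vis 1 [u]).length - (pvDesc graph vis 2 [u]).length - (pvDesc graph vis 3 [u]).length) (by omega) (by rw [hfuel]; omega) ((hhit 4 (by omega)).trans hdfs4)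
        rw [e4, pvBfsLoop_break graph u v vis (pvDesc graph vis 5 [u]) _
          (fun q hq => hlen 5 q hq)]
        simp [hdfs2, hdfs3, hdfs4]

-- ===== VERDICT (by name: the statement is the Claim_ definition above) =====
theorem find_path_between_two_nodes_bfs_no_direct_edge_no_logging_spec : Claim_equal_find_path_between_two_nodes_bfs_no_direct_edge_no_logging := by
  intro graph u v visited _ _
  exact pv_main graph u v visited
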